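-- pv_equiv track=rewrite | github.com/fer-vs-tech/dashboards | ifrs17_accounting_selic/helpers.py | prepere_checking
-- ===== SOURCE A (Python) =====
-- def prepere_checking(count_num):
--     """
--     Prepare checking
--     """
--     # Initialization
--     temp_list = []
--     keys = {
--         "NB": [],
--         "IF": [],
--     }
--
--     # Generate list of grouped numbers [1,2], [3,4], [5,6] ...
--     for i in range(1, count_num, 2):
--         temp_list.append([i, i + 1])
--
--     # Store IF and NB numbers in separate lists
--     for i, val in enumerate(temp_list):
--         if i % 2 == 0:
--             keys["IF"].append(val)
--         else:
--             keys["NB"].append(val)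
--
--     # Flat nested list
--     keys["NB"] = [j for i in keys["NB"] for j in i]
--     keys["IF"] = [j for i in keys["IF"] for j in i]
--
--     return keys
-- ===== SOURCE B (Python) =====
-- def prepere_checking(count_num):
--     """
--     Prepare checking
--     """
--     keys = {"NB": [], "IF": []}
--     take_if = True  # the first pair goes to IF
--     for i in range(1, count_num, 2):
--         keys["IF" if take_if else "NB"].extend((i, i + 1))
--         take_if = not take_if
--     return keys
-- ===== Notes on version B (the rewrite author's own statement) =====
-- stated objective: simpler
-- what changed: One pass over range(1,count_num,2) with a boolean toggle appends each pair directly to IF or NB, eliminating the intermediate temp_list of pairs, the enumerate-split loop and the two flatten comprehensions.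
import Mathlib
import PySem

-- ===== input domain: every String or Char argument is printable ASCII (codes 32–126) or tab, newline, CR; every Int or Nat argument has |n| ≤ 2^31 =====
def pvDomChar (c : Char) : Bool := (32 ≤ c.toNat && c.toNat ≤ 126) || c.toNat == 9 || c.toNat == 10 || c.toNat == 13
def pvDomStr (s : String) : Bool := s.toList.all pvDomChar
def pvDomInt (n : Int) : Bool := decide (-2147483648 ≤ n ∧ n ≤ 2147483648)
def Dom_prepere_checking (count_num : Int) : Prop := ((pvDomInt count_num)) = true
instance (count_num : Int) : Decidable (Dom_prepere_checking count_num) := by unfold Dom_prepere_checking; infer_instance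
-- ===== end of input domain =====

-- B replaces A's temp_list/enumerate-split/flatten pipeline by a single toggle loop (objective: simpler).

-- ===== PORT A =====
def prepere_checking (count_num : Int) : List (String × List Int) :=
  -- temp_list = []; for i in range(1, count_num, 2): temp_list.append([i, i+1])
  let temp_list : List (List Int) :=
    (PySem.List.pyRange 1 count_num 2).foldl (fun acc i => acc ++ [[i, i + 1]]) []
  -- keys = {"NB": [], "IF": []}   (held as List (List Int) while the loop appends pairs)
  let keys : PySem.Dict String (List (List Int)) :=
    PySem.Dict.ofList [("NB", []), ("IF", [])]
  -- for i, val in enumerate(temp_list): …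
  let keys :=
    (PySem.List.enumerate temp_list).foldl
      (fun ks iv =>
        if PySem.Int.mod iv.1 2 == 0 then ks.modify "IF" [] (fun l => l ++ [iv.2])
        else ks.modify "NB" [] (fun l => l ++ [iv.2]))
      keys
  -- keys["NB"]/keys["IF"] are reassigned to the flattened lists (the value type changes from
  -- List (List Int) to List Int, so the re-built dict is written as its item list, order NB, IF)
  [("NB", (keys.getD "NB" []).flatMap (fun i => i)),
   ("IF", (keys.getD "IF" []).flatMap (fun i => i))]

-- ===== PORT B =====
def prepere_checking_alt (count_num : Int) : List (String × List Int) :=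
  -- one pass with a toggle: state = (NB, IF, take_if)
  let r :=
    (PySem.List.pyRange 1 count_num 2).foldl
      (fun (s : List Int × List Int × Bool) i =>
        if s.2.2 then (s.1, s.2.1 ++ [i, i + 1], false)
        else (s.1 ++ [i, i + 1], s.2.1, true))
      ([], [], true)
  [("NB", r.1), ("IF", r.2.1)]

-- ===== PRECONDITION & SPEC =====
def Spec_prepere_checking (count_num : Int) (out : List (String × List Int)) : Prop := out = prepere_checking_alt count_num
instance (count_num : Int) (out : List (String × List Int)) : Decidable (Spec_prepere_checking count_num out) := by unfold Spec_prepere_checking; infer_instance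

-- ===== CLAIM (what is proved, stated in full; the proofs are below) =====
def Claim_equal_prepere_checking : Prop := ∀ (count_num : Int), Dom_prepere_checking count_num → Spec_prepere_checking count_num (prepere_checking count_num)

-- ===== LEMMAS AND PROOFS =====

-- elements at even positions (b = true) resp. odd positions (b = false)
def sel {α : Type} : Bool → List α → List α
  | _, [] => []
  | true, a :: l => a :: sel false l
  | false, _ :: l => sel true l

theorem sel_map {α β : Type} (f : α → β) (l : List α) :
    ∀ b : Bool, sel b (l.map f) = (sel b l).map f := by
  induction l with
  | nil => intro b; cases b <;> rfl
  | cons a l ih => intro b; cases b <;> simp [sel, ih]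

theorem loopA (temp : List (List Int)) :
    ∀ (s : Int) (d : PySem.Dict String (List (List Int))),
      (((PySem.List.enumerate temp s).foldl
          (fun ks iv =>
            if PySem.Int.mod iv.1 2 == 0 then ks.modify "IF" [] (fun l => l ++ [iv.2])
            else ks.modify "NB" [] (fun l => l ++ [iv.2])) d).getD "NB" []
        = d.getD "NB" [] ++ sel (PySem.Int.mod s 2 == 1) temp)
      ∧ (((PySem.List.enumerate temp s).foldl
          (fun ks iv =>
            if PySem.Int.mod iv.1 2 == 0 then ks.modify "IF" [] (fun l => l ++ [iv.2])
            else ks.modify "NB" [] (fun l => l ++ [iv.2])) d).getD "IF" []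
        = d.getD "IF" [] ++ sel (PySem.Int.mod s 2 == 0) temp) := by
  induction temp with
  | nil => intro s d; simp [PySem.List.enumerate_nil, sel]
  | cons a temp ih =>
    intro s d
    rw [PySem.List.enumerate_cons]
    have h2 : (0 : Int) < 2 := by norm_num
    rw [PySem.Int.mod_eq_emod_of_pos (a := s) h2]
    by_cases h : s % 2 = 0
    · have hs : (PySem.Int.mod s 2 == 0) = true := by
        simp [h]
      have hs1 : ((s + 1) % 2 : Int) = 1 := by omega
      simp only [List.foldl_cons, hs, if_true]
      have := ih (s + 1) (d.modify "IF" [] (fun l => l ++ [a]))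
      rw [PySem.Int.mod_eq_emod_of_pos (a := s + 1) h2] at this
      rw [this.1, this.2]
      constructor
      · rw [PySem.Dict.getD_modify_of_ne _ _ _ (by decide : ("NB" : String) ≠ "IF")]
        simp [h, hs1, sel]
      · rw [PySem.Dict.getD_modify_self]
        simp [h, hs1, sel]
    · have hs : (PySem.Int.mod s 2 == 0) = false := by
        simp [h]
      have h1 : (s % 2 : Int) = 1 := by omega
      have hs1 : ((s + 1) % 2 : Int) = 0 := by omega
      simp only [List.foldl_cons, hs, Bool.false_eq_true, if_false]
      have := ih (s + 1) (d.modify "NB" [] (fun l => l ++ [a]))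
      rw [PySem.Int.mod_eq_emod_of_pos (a := s + 1) h2] at this
      rw [this.1, this.2]
      constructor
      · rw [PySem.Dict.getD_modify_self]
        simp [h1, hs1, sel]
      · rw [PySem.Dict.getD_modify_of_ne _ _ _ (by decide : ("IF" : String) ≠ "NB")]
        simp [h1, hs1, sel]

theorem loopB (l : List Int) :
    ∀ (nb if_ : List Int) (t : Bool),
      ((l.foldl (fun (s : List Int × List Int × Bool) i =>
          if s.2.2 then (s.1, s.2.1 ++ [i, i + 1], false)
          else (s.1 ++ [i, i + 1], s.2.1, true)) (nb, if_, t)).1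
        = nb ++ (sel (!t) l).flatMap (fun i => [i, i + 1]))
      ∧ ((l.foldl (fun (s : List Int × List Int × Bool) i =>
          if s.2.2 then (s.1, s.2.1 ++ [i, i + 1], false)
          else (s.1 ++ [i, i + 1], s.2.1, true)) (nb, if_, t)).2.1
        = if_ ++ (sel t l).flatMap (fun i => [i, i + 1])) := by
  induction l with
  | nil => intro nb if_ t; simp [sel]
  | cons a l ih =>
    intro nb if_ t
    cases t
    · simpa [sel] using ih (nb ++ [a, a + 1]) if_ true
    · simpa [sel] using ih nb (if_ ++ [a, a + 1]) false

-- ===== VERDICT (by name: the statement is the Claim_ definition above) =====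
theorem prepere_checking_spec : Claim_equal_prepere_checking := by
  intro count_num _
  unfold Spec_prepere_checking prepere_checking prepere_checking_alt
  rw [PySem.List.foldl_append_singleton_eq_map]
  have hA := loopA ((PySem.List.pyRange 1 count_num 2).map (fun i => [i, i + 1])) 0
    (PySem.Dict.ofList [("NB", []), ("IF", [])])
  have hB := loopB (PySem.List.pyRange 1 count_num 2) [] [] true
  have e1 : (PySem.Dict.ofList [("NB", ([] : List (List Int))), ("IF", [])]).getD "NB" [] = [] := by
    decide
  have e2 : (PySem.Dict.ofList [("NB", ([] : List (List Int))), ("IF", [])]).getD "IF" [] = [] := by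
    decide
  have m1 : (PySem.Int.mod 0 2 == 1) = false := by decide
  have m0 : (PySem.Int.mod 0 2 == 0) = true := by decide
  rw [e1, e2, m1, m0] at hA
  simp only [List.nil_append] at hA hB
  simp only [List.nil_append, Bool.not_true] at hB ⊢
  simp only [hA.1, hA.2, hB.1, hB.2, sel_map, List.flatMap_map, Function.comp]
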